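-- pv_equiv track=rewrite | github.com/pangeran-bottor/coding_challenges | codechef/april_2020_div2/unitgcd.py | solve
-- ===== SOURCE A (Python) =====
-- def solve(N):
--     if N <= 3:
--         return [[i for i in range(1, N+1)]]
--
--     result = [[1, 2, 3]]
--     for i in range(4, N+1):
--         if len(result[-1]) >= 2:
--             result.append([i])
--         else:
--             result[-1].append(i)
--     return result
-- ===== SOURCE B (Python) =====
-- def solve(N):
--     if N <= 3:
--         return [list(range(1, N + 1))]
--     result = [[1, 2, 3]]
--     for i in range(4, N + 1, 2):
--         result.append(list(range(i, min(i + 1, N) + 1)))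
--     return result
-- ===== Notes on version B (the rewrite author's own statement) =====
-- stated objective: simpler
-- what changed: Instead of walking 1..N element by element and inspecting the length of the last group to decide whether to extend it or open a new one, B emits one whole group per iteration: the fixed [1,2,3] head followed by a stride-2 loop that appends each pair (or the final singleton, clamped by min) as a complete chunk.
import Mathlib
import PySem

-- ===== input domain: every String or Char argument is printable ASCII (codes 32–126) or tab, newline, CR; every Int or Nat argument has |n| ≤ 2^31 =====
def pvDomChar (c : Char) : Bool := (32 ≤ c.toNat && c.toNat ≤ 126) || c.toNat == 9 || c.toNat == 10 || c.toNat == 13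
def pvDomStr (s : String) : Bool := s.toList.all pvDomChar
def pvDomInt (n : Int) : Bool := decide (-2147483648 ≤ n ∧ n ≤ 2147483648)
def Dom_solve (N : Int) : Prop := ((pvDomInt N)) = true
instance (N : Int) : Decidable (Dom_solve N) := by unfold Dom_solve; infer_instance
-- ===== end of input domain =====

-- B groups 1..N by emitting whole chunks (pairs / final singleton) per stride-2 iteration instead
-- of A's element-by-element loop inspecting the last group's length; the return values are equal.

-- ===== PORT A =====
-- the loop body of A; result[-1] is ported as PySem.List.pyGetD result (-1) []
-- (exact here: result is never empty on this loop, so Python raises no IndexError)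
def solveStepA (result : List (List Int)) (i : Int) : List (List Int) :=
  if 2 ≤ (PySem.List.pyGetD result (-1) []).length then
    result ++ [[i]]
  else
    result.dropLast ++ [PySem.List.pyGetD result (-1) [] ++ [i]]

def solve (N : Int) : List (List Int) :=
  if N ≤ 3 then [(PySem.List.pyRange 1 (N + 1) 1).map (fun i => i)]
  else (PySem.List.pyRange 4 (N + 1) 1).foldl solveStepA [[1, 2, 3]]

-- ===== PORT B =====
def solve_alt (N : Int) : List (List Int) :=
  if N ≤ 3 then [PySem.List.pyRange 1 (N + 1) 1]
  else
    (PySem.List.pyRange 4 (N + 1) 2).foldl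
      (fun result i => result ++ [PySem.List.pyRange i (min (i + 1) N + 1) 1]) [[1, 2, 3]]

-- ===== PRECONDITION & SPEC =====
def Spec_solve (N : Int) (out : List (List Int)) : Prop := out = solve_alt N
instance (N : Int) (out : List (List Int)) : Decidable (Spec_solve N out) := by unfold Spec_solve; infer_instance

-- ===== CLAIM (what is proved, stated in full; the proofs are below) =====
def Claim_equal_solve : Prop := ∀ (N : Int), Dom_solve N → Spec_solve N (solve N)

-- ===== LEMMAS AND PROOFS =====

-- the pair groups [4,5],[6,7],… produced after the head group [1,2,3]
def solvePairs (k : Nat) : List (List Int) :=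
  (List.range k).map (fun (j : Nat) => [4 + 2 * (j : Int), 5 + 2 * (j : Int)])

theorem solvePairs_succ (k : Nat) :
    solvePairs (k + 1) = solvePairs k ++ [[4 + 2 * (k : Int), 5 + 2 * (k : Int)]] := by
  simp [solvePairs, List.range_succ]

theorem pyGetD_neg_one_concat (l : List (List Int)) (x : List Int) :
    PySem.List.pyGetD (l ++ [x]) (-1) [] = x := by
  simp [PySem.List.pyGetD]

-- A's step on a state whose last group is still short: extend the last group
theorem stepA_concat_short (l : List (List Int)) (g : List Int) (i : Int) (hg : g.length ≤ 1) :
    solveStepA (l ++ [g]) i = l ++ [g ++ [i]] := by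
  unfold solveStepA
  rw [pyGetD_neg_one_concat, if_neg (by omega), List.dropLast_concat]

-- A's step on a state whose last group is full: open a new group
theorem stepA_concat_long (l : List (List Int)) (g : List Int) (i : Int) (hg : 2 ≤ g.length) :
    solveStepA (l ++ [g]) i = (l ++ [g]) ++ [[i]] := by
  unfold solveStepA
  rw [pyGetD_neg_one_concat, if_pos hg]

-- A's fold after processing 4..3+2k (odd end) and after 4..4+2k (even end)
theorem solveA_fold (k : Nat) :
    (PySem.List.pyRange 4 (4 + 2 * (k : Int)) 1).foldl solveStepA [[1, 2, 3]]
        = [[1, 2, 3]] ++ solvePairs k ∧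
    (PySem.List.pyRange 4 (5 + 2 * (k : Int)) 1).foldl solveStepA [[1, 2, 3]]
        = [[1, 2, 3]] ++ solvePairs k ++ [[4 + 2 * (k : Int)]] := by
  induction k with
  | zero => constructor <;> decide
  | succ k ih =>
    obtain ⟨-, hb⟩ := ih
    have hsplit1 : PySem.List.pyRange 4 (4 + 2 * ((k : Int) + 1)) 1
        = PySem.List.pyRange 4 (5 + 2 * (k : Int)) 1 ++ [5 + 2 * (k : Int)] := by
      have h := PySem.List.pyRange_one_succ_right (a := 4) (b := 5 + 2 * (k : Int)) (by omega)
      rw [show (4 : Int) + 2 * ((k : Int) + 1) = 5 + 2 * (k : Int) + 1 by ring, h]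
    have ha' : (PySem.List.pyRange 4 (4 + 2 * ((k : Int) + 1)) 1).foldl solveStepA [[1, 2, 3]]
        = [[1, 2, 3]] ++ solvePairs (k + 1) := by
      rw [hsplit1, List.foldl_append, hb, List.foldl_cons, List.foldl_nil,
        stepA_concat_short ([[1, 2, 3]] ++ solvePairs k) [4 + 2 * (k : Int)]
          (5 + 2 * (k : Int)) (by simp),
        solvePairs_succ]
      simp
    refine ⟨by push_cast at ha' ⊢; exact ha', ?_⟩
    have hsplit2 : PySem.List.pyRange 4 (5 + 2 * ((k : Int) + 1)) 1
        = PySem.List.pyRange 4 (4 + 2 * ((k : Int) + 1)) 1 ++ [4 + 2 * ((k : Int) + 1)] := by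
      have h := PySem.List.pyRange_one_succ_right (a := 4) (b := 4 + 2 * ((k : Int) + 1)) (by omega)
      rw [show (5 : Int) + 2 * ((k : Int) + 1) = 4 + 2 * ((k : Int) + 1) + 1 by ring, h]
    have hb' : (PySem.List.pyRange 4 (5 + 2 * ((k : Int) + 1)) 1).foldl solveStepA [[1, 2, 3]]
        = [[1, 2, 3]] ++ solvePairs (k + 1) ++ [[4 + 2 * ((k : Int) + 1)]] := by
      rw [hsplit2, List.foldl_append, ha', List.foldl_cons, List.foldl_nil, solvePairs_succ,
        ← List.append_assoc,
        stepA_concat_long _ [4 + 2 * (k : Int), 5 + 2 * (k : Int)] _ (by simp)]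
    push_cast at hb' ⊢
    exact hb'

-- step-2 ranges written as mapped List.range
theorem pyRange_two_even (k : Nat) :
    PySem.List.pyRange 4 (4 + 2 * (k : Int)) 2 = (List.range k).map (fun (j : Nat) => 4 + 2 * (j : Int)) := by
  rw [PySem.List.pyRange_of_pos 4 (4 + 2 * (k : Int)) (by norm_num)]
  have hc : (if (4 : Int) < 4 + 2 * (k : Int) then ((4 + 2 * (k : Int) - 4 + 2 - 1) / 2).toNat else 0) = k := by
    split_ifs with h <;> omega
  rw [hc]

theorem pyRange_two_odd (k : Nat) :
    PySem.List.pyRange 4 (5 + 2 * (k : Int)) 2 = (List.range (k + 1)).map (fun (j : Nat) => 4 + 2 * (j : Int)) := by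
  rw [PySem.List.pyRange_of_pos 4 (5 + 2 * (k : Int)) (by norm_num)]
  have hc : (if (4 : Int) < 5 + 2 * (k : Int) then ((5 + 2 * (k : Int) - 4 + 2 - 1) / 2).toNat else 0) = k + 1 := by
    split_ifs with h <;> omega
  rw [hc]

theorem pyRange_pair (a : Int) : PySem.List.pyRange a (a + 2) 1 = [a, a + 1] := by
  rw [PySem.List.pyRange_one_cons (by omega), PySem.List.pyRange_one_cons (by omega),
    PySem.List.pyRange_one_eq_nil (by omega)]

-- B's fold for odd end N = 3+2k
theorem solveB_fold_odd (k : Nat) :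
    (PySem.List.pyRange 4 (3 + 2 * (k : Int) + 1) 2).foldl
        (fun result i => result ++ [PySem.List.pyRange i (min (i + 1) (3 + 2 * (k : Int)) + 1) 1]) [[1, 2, 3]]
      = [[1, 2, 3]] ++ solvePairs k := by
  rw [show (3 : Int) + 2 * (k : Int) + 1 = 4 + 2 * (k : Int) by ring, pyRange_two_even,
    PySem.List.foldl_append_singleton_eq_map, List.map_map, solvePairs]
  congr 1
  refine List.map_congr_left (fun j hj => ?_)
  have hj' : j < k := List.mem_range.mp hj
  have hmin : min (4 + 2 * (j : Int) + 1) (3 + 2 * (k : Int)) = 4 + 2 * (j : Int) + 1 := by omega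
  simp only [Function.comp]
  rw [hmin, show (4 : Int) + 2 * (j : Int) + 1 + 1 = (4 + 2 * (j : Int)) + 2 by ring, pyRange_pair]
  norm_num
  omega

-- B's fold for even end N = 4+2k
theorem solveB_fold_even (k : Nat) :
    (PySem.List.pyRange 4 (4 + 2 * (k : Int) + 1) 2).foldl
        (fun result i => result ++ [PySem.List.pyRange i (min (i + 1) (4 + 2 * (k : Int)) + 1) 1]) [[1, 2, 3]]
      = [[1, 2, 3]] ++ solvePairs k ++ [[4 + 2 * (k : Int)]] := by
  rw [show (4 : Int) + 2 * (k : Int) + 1 = 5 + 2 * (k : Int) by ring, pyRange_two_odd,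
    PySem.List.foldl_append_singleton_eq_map, List.map_map, List.range_succ, List.map_append,
    List.append_assoc]
  congr 1
  congr 1
  · rw [solvePairs]
    refine List.map_congr_left (fun j hj => ?_)
    have hj' : j < k := List.mem_range.mp hj
    have hmin : min (4 + 2 * (j : Int) + 1) (4 + 2 * (k : Int)) = 4 + 2 * (j : Int) + 1 := by omega
    simp only [Function.comp]
    rw [hmin, show (4 : Int) + 2 * (j : Int) + 1 + 1 = (4 + 2 * (j : Int)) + 2 by ring, pyRange_pair]
    norm_num
    omega
  · simp only [List.map_cons, List.map_nil, Function.comp]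
    have hmin : min (4 + 2 * (k : Int) + 1) (4 + 2 * (k : Int)) = 4 + 2 * (k : Int) := by omega
    rw [hmin, PySem.List.pyRange_one_cons (by omega), PySem.List.pyRange_one_eq_nil (by omega)]

-- ===== VERDICT (by name: the statement is the Claim_ definition above) =====
theorem solve_spec : Claim_equal_solve := by
  intro N _
  unfold Spec_solve solve solve_alt
  by_cases h3 : N ≤ 3
  · simp [h3]
  · rw [if_neg h3, if_neg h3]
    rcases Int.even_or_odd N with ⟨m, hm⟩ | ⟨m, hm⟩
    · obtain ⟨k, hk⟩ : ∃ k : Nat, N = 4 + 2 * (k : Int) := ⟨(m - 2).toNat, by omega⟩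
      subst hk
      rw [solveB_fold_even k, show (4 : Int) + 2 * (k : Int) + 1 = 5 + 2 * (k : Int) by ring,
        (solveA_fold k).2]
    · obtain ⟨k, hk⟩ : ∃ k : Nat, N = 3 + 2 * (k : Int) := ⟨(m - 1).toNat, by omega⟩
      subst hk
      rw [solveB_fold_odd k, show (3 : Int) + 2 * (k : Int) + 1 = 4 + 2 * (k : Int) by ring,
        (solveA_fold k).1]
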